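-- pv_equiv track=rewrite | github.com/evergreendong/Guess-the-Color | guess the color.py | get_2gram
-- ===== SOURCE A (Python) =====
-- def get_2gram(s):
--     N_word = len(s)
--     i = N_word - 2
--     while i >= 0:
--         p1 = s[i]
--         p2 = s[i+1]
--         yield (p1,p2)
--         i -= 1
-- ===== SOURCE B (Python) =====
-- def get_2gram(s):
--     # Divide and conquer: split the index range of pairs in half, emit the
--     # right half's pairs first, then the left half's (so overall reverse order).
--     def gen(lo, hi):
--         if hi <= lo:
--             return
--         if hi - lo == 1:
--             yield (s[lo], s[lo + 1])
--             return
--         mid = (lo + hi) // 2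
--         yield from gen(mid, hi)
--         yield from gen(lo, mid)
--     yield from gen(0, len(s) - 1)
-- ===== Notes on version B (the rewrite author's own statement) =====
-- stated objective: alternative
-- what changed: B emits the reversed 2-grams by divide-and-conquer recursion on the pair-index range (right half, then left half), instead of A's linear descending-index while loop.
import Mathlib
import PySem

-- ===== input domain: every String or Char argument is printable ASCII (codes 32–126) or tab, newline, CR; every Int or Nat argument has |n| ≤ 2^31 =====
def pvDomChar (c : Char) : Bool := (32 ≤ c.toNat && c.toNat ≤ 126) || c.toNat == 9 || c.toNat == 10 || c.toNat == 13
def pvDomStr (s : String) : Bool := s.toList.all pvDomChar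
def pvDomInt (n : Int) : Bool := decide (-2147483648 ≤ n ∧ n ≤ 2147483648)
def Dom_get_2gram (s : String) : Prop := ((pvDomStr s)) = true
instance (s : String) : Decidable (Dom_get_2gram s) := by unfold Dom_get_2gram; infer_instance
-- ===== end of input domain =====

-- B emits the reversed 2-grams by divide-and-conquer recursion on the pair-index range (right half, then left half) instead of A's descending index while loop; objective: alternative.


-- ===== PORT A =====
-- A's while loop, i counting down from len(s)-2; an out-of-range index (unreachable
-- from A's entry) would be an IndexError, rendered here as stopping with [].
def get_2gramGo (cs : List Char) (i : Int) : List (String × String) :=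
  if _h : 0 ≤ i then
    match PySem.List.pyGet? cs i, PySem.List.pyGet? cs (i + 1) with
    | some p1, some p2 => (String.ofList [p1], String.ofList [p2]) :: get_2gramGo cs (i - 1)
    | _, _ => []
  else []
termination_by (i + 1).toNat
decreasing_by omega

def get_2gram (s : String) : List (String × String) :=
  get_2gramGo s.toList (PySem.Str.len s - 2)

-- ===== PORT B =====
-- Source B's inner generator gen(lo, hi): emit the right half's pairs, then the left
-- half's; a leaf emits the single pair (s[lo], s[lo+1]) (in range from B's entry,
-- an out-of-range index would be an IndexError, rendered as []).
def get_2gramAltGen (cs : List Char) (lo hi : Int) : List (String × String) :=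
  if hi ≤ lo then []
  else if hi - lo = 1 then
    match PySem.List.pyGet? cs lo, PySem.List.pyGet? cs (lo + 1) with
    | some p1, some p2 => [(String.ofList [p1], String.ofList [p2])]
    | _, _ => []
  else
    let mid := PySem.Int.floordiv (lo + hi) 2
    get_2gramAltGen cs mid hi ++ get_2gramAltGen cs lo mid
termination_by (hi - lo).toNat
decreasing_by
  all_goals
    have hm : PySem.Int.floordiv (lo + hi) 2 = (lo + hi) / 2 :=
      PySem.Int.floordiv_eq_ediv_of_pos (by omega)
    rw [hm]
    omega

def get_2gram_alt (s : String) : List (String × String) :=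
  get_2gramAltGen s.toList 0 (PySem.Str.len s - 1)

-- ===== PRECONDITION & SPEC =====
def Spec_get_2gram (s : String) (out : List (String × String)) : Prop := out = get_2gram_alt s
instance (s : String) (out : List (String × String)) : Decidable (Spec_get_2gram s out) := by unfold Spec_get_2gram; infer_instance

-- ===== CLAIM (what is proved, stated in full; the proofs are below) =====
def Claim_equal_get_2gram : Prop := ∀ (s : String), Dom_get_2gram s → Spec_get_2gram s (get_2gram s)

-- ===== LEMMAS AND PROOFS =====

-- Reference: the pair at index i, total via getD (used only in proofs).
def pvPairAt (cs : List Char) (i : Int) : String × String :=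
  (String.ofList [cs.getD i.toNat ' '], String.ofList [cs.getD (i + 1).toNat ' '])

-- Reference list: pairs at indices hi-1, hi-2, …, lo (descending).
def pvDesc (cs : List Char) (lo hi : Int) : List (String × String) :=
  if hi ≤ lo then [] else pvPairAt cs (hi - 1) :: pvDesc cs lo (hi - 1)
termination_by (hi - lo).toNat
decreasing_by omega

theorem pvDesc_nil (cs : List Char) (lo hi : Int) (h : hi ≤ lo) : pvDesc cs lo hi = [] := by
  rw [pvDesc.eq_def]; simp [h]

theorem pvDesc_split (cs : List Char) (lo mid hi : Int) (h1 : lo ≤ mid) (h2 : mid ≤ hi) :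
    pvDesc cs lo hi = pvDesc cs mid hi ++ pvDesc cs lo mid := by
  by_cases h : hi ≤ mid
  · have he : mid = hi := le_antisymm h2 h
    rw [← he, pvDesc_nil cs mid mid le_rfl, List.nil_append]
  · have hle : ¬ hi ≤ lo := by omega
    conv_lhs => rw [pvDesc.eq_def]
    conv_rhs => rw [pvDesc.eq_def]
    rw [if_neg hle, if_neg h]
    rw [pvDesc_split cs lo mid (hi - 1) h1 (by omega)]
    simp
termination_by (hi - mid).toNat
decreasing_by omega

theorem pyGet?_in_range (cs : List Char) (i : Int) (h0 : 0 ≤ i) (h1 : i < (cs.length : Int)) :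
    PySem.List.pyGet? cs i = some (cs.getD i.toNat ' ') := by
  have hi : i = ((i.toNat : Nat) : Int) := by omega
  have hlt : i.toNat < cs.length := by omega
  conv_lhs => rw [hi]
  rw [PySem.List.pyGet?_natCast, List.getElem?_eq_getElem hlt, List.getD_eq_getElem cs ' ' hlt]

theorem altGen_eq_desc (cs : List Char) (lo hi : Int) (h0 : 0 ≤ lo)
    (h1 : hi < (cs.length : Int)) :
    get_2gramAltGen cs lo hi = pvDesc cs lo hi := by
  rw [get_2gramAltGen.eq_def]
  by_cases hle : hi ≤ lo
  · simp [hle, pvDesc_nil cs lo hi hle]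
  · simp only [hle, if_false]
    by_cases hone : hi - lo = 1
    · simp only [hone, if_true]
      rw [pyGet?_in_range cs lo h0 (by omega), pyGet?_in_range cs (lo + 1) (by omega) (by omega)]
      rw [pvDesc.eq_def]
      simp only [hle, if_false]
      rw [pvDesc_nil cs lo (hi - 1) (by omega)]
      have : hi - 1 = lo := by omega
      simp [this, pvPairAt]
    · simp only [hone, if_false]
      have hm : PySem.Int.floordiv (lo + hi) 2 = (lo + hi) / 2 :=
        PySem.Int.floordiv_eq_ediv_of_pos (by omega)
      rw [hm]
      have hb1 : lo < (lo + hi) / 2 := by omega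
      have hb2 : (lo + hi) / 2 < hi := by omega
      rw [altGen_eq_desc cs ((lo + hi) / 2) hi (by omega) h1,
          altGen_eq_desc cs lo ((lo + hi) / 2) h0 (by omega),
          pvDesc_split cs lo ((lo + hi) / 2) hi (by omega) (by omega)]
termination_by (hi - lo).toNat
decreasing_by all_goals omega

theorem go_eq_desc (cs : List Char) (i : Int) (h1 : i + 1 < (cs.length : Int)) :
    get_2gramGo cs i = pvDesc cs 0 (i + 1) := by
  rw [get_2gramGo.eq_def]
  by_cases h0 : 0 ≤ i
  · simp only [h0, dif_pos]
    rw [pyGet?_in_range cs i h0 (by omega), pyGet?_in_range cs (i + 1) (by omega) h1]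
    rw [go_eq_desc cs (i - 1) (by omega)]
    conv_rhs => rw [pvDesc.eq_def]
    have : ¬ i + 1 ≤ 0 := by omega
    simp only [this, if_false]
    simp [pvPairAt]
  · rw [dif_neg h0, pvDesc_nil cs 0 (i + 1) (by omega)]
termination_by (i + 1).toNat
decreasing_by omega

-- ===== VERDICT (by name: the statement is the Claim_ definition above) =====
theorem get_2gram_spec : Claim_equal_get_2gram := by
  intro s _
  unfold Spec_get_2gram get_2gram get_2gram_alt
  set cs := s.toList with hcs
  have hlen : PySem.Str.len s = (cs.length : Int) := by simp [PySem.Str.len_eq, hcs]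
  rw [hlen]
  rw [go_eq_desc cs ((cs.length : Int) - 2) (by omega),
      altGen_eq_desc cs 0 ((cs.length : Int) - 1) le_rfl (by omega)]
  congr 1
  omega
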